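-- pv_equiv track=rewrite | github.com/wiknwo/codility | Challenges/the_matrix_2021_MaxSquareOnMatrix.py | solution
-- ===== SOURCE A (Python) =====
-- def verify(A, K):
--     i = 0
--     while i < len(A):
--         j = i
--         while j < len(A) and A[j] >= K:
--             j += 1
--         # Range [i, j - 1] is ok
--         if j - i >= K:
--             return True
--         i = max(j, i + 1)
--     return False
--
-- def solution(A):
--     # write your code in Python 3.6
--     lower_bound, upper_bound = 1, len(A)
--     while lower_bound < upper_bound:
--         midpoint = (lower_bound + upper_bound + 1) // 2
--         if verify(A, midpoint):
--             lower_bound = midpoint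
--         else:
--             upper_bound = midpoint - 1
--     return lower_bound
-- ===== SOURCE B (Python) =====
-- def solution(A):
--     n = len(A)
--     left = [0] * n
--     for i in range(n):
--         p = i
--         while p > 0 and A[p - 1] >= A[i]:
--             p = left[p - 1]
--         left[i] = p
--     right = [0] * n
--     for i in range(n - 1, -1, -1):
--         q = i
--         while q < n - 1 and A[q + 1] >= A[i]:
--             q = right[q + 1]
--         right[i] = q
--     best = 1
--     for i in range(n):
--         cand = A[i] if A[i] < right[i] - left[i] + 1 else right[i] - left[i] + 1
--         if cand > best:
--             best = cand
--     return best
-- ===== Notes on version B (the rewrite author's own statement) =====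
-- stated objective: faster
-- what changed: Replaces the binary search over K (each step re-scanning the array with verify) by a direct computation: for each index, the maximal window in which it is a minimum is found via jump-compressed left/right span arrays, and the answer is max(1, max_i min(A[i], span_i)).
import Mathlib
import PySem

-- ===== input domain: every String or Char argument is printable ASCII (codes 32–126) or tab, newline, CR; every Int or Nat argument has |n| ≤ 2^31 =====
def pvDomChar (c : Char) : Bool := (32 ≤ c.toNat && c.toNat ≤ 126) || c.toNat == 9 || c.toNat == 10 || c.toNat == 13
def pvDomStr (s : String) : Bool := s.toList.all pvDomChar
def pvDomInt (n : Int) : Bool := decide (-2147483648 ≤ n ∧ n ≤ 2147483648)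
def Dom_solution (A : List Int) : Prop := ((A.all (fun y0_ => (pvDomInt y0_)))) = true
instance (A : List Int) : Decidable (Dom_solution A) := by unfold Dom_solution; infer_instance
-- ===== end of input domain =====

-- B replaces A's binary search (O(log n) full verify scans) by computing, per index, the maximal
-- window in which it is a minimum via jump-compressed span arrays: answer = max(1, max_i min(A[i], span_i)).

-- element access A[i] (always used in range by both ports)
def pvG (A : List Int) (i : Nat) : Int := A.getD i 0

-- ===== PORT A =====
-- inner while of verify: `while j < len(A) and A[j] >= K: j += 1`
def innerJ (A : List Int) (K : Nat) (j : Nat) : Nat :=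
  if h : j < A.length ∧ (K : Int) ≤ pvG A j then innerJ A K (j + 1) else j
termination_by A.length - j
decreasing_by omega

-- outer while of verify, from index i
def verifyFrom (A : List Int) (K : Nat) (i : Nat) : Bool :=
  if h : i < A.length then
    if K ≤ innerJ A K i - i then true
    else verifyFrom A K (max (innerJ A K i) (i + 1))
  else false
termination_by A.length - i
decreasing_by omega

-- binary search loop of solution
def bsLoop (A : List Int) (l u : Nat) : Nat :=
  if h : l < u then
    let m := (l + u + 1) / 2
    if verifyFrom A m 0 then bsLoop A m u else bsLoop A l (m - 1)
  else l
termination_by u - l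
decreasing_by all_goals omega

def solution (A : List Int) : Int := (bsLoop A 1 A.length : Int)

-- ===== PORT B =====
-- `while p > 0 and A[p-1] >= A[i]: p = left[p-1]`  (fuel only makes the loop total; it never runs out)
def jumpL (A : List Int) (left : List Nat) (x : Int) (p : Nat) (fuel : Nat) : Nat :=
  match fuel with
  | 0 => p
  | fuel + 1 =>
    if 0 < p ∧ x ≤ pvG A (p - 1) then jumpL A left x (left.getD (p - 1) 0) fuel else p

-- `for i in range(n): ... left[i] = p`
def leftLoop (A : List Int) (i : Nat) (acc : List Nat) : List Nat :=
  if h : i < A.length then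
    leftLoop A (i + 1) (acc ++ [jumpL A acc (pvG A i) i (i + 1)])
  else acc
termination_by A.length - i
decreasing_by omega

-- `while q < n - 1 and A[q+1] >= A[i]: q = right[q+1]`; racc holds right[i+1..n-1], so right[q+1] = racc[q-i]
def jumpR (A : List Int) (racc : List Nat) (i : Nat) (x : Int) (q : Nat) (fuel : Nat) : Nat :=
  match fuel with
  | 0 => q
  | fuel + 1 =>
    if q + 1 < A.length ∧ x ≤ pvG A (q + 1) then jumpR A racc i x (racc.getD (q - i) 0) fuel else q

-- `for i in range(n-1, -1, -1): ... right[i] = q` (i+1 ↦ process index i, prepending)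
def rightLoop (A : List Int) (i : Nat) (racc : List Nat) : List Nat :=
  match i with
  | 0 => racc
  | i + 1 => rightLoop A i (jumpR A racc i (pvG A i) i (A.length - i) :: racc)

-- `cand = A[i] if A[i] < span else span` with `span = right[i] - left[i] + 1`
def candV (A : List Int) (L R : List Nat) (i : Nat) : Int :=
  if pvG A i < (R.getD i 0 : Int) - (L.getD i 0 : Int) + 1 then pvG A i
  else (R.getD i 0 : Int) - (L.getD i 0 : Int) + 1

-- `best = 1; for i in range(n): ... ; if cand > best: best = cand`
def bestLoop (A : List Int) (left right : List Nat) (i : Nat) (best : Int) : Int :=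
  if h : i < A.length then
    bestLoop A left right (i + 1)
      (if best < candV A left right i then candV A left right i else best)
  else best
termination_by A.length - i
decreasing_by omega

def solution_alt (A : List Int) : Int :=
  bestLoop A (leftLoop A 0 []) (rightLoop A A.length []) 0 1

-- ===== PRECONDITION & SPEC =====
def Spec_solution (A : List Int) (out : Int) : Prop := out = solution_alt A
instance (A : List Int) (out : Int) : Decidable (Spec_solution A out) := by unfold Spec_solution; infer_instance

-- ===== CLAIM (what is proved, stated in full; the proofs are below) =====
def Claim_equal_solution : Prop := ∀ (A : List Int), Dom_solution A → Spec_solution A (solution A)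

-- ===== LEMMAS AND PROOFS =====

-- "there are k consecutive elements all ≥ k"
def GoodN (A : List Int) (k : Nat) : Prop :=
  ∃ s < A.length + 1, s + k ≤ A.length ∧ ∀ t < k, (k : Int) ≤ pvG A (s + t)

def goodDec (A : List Int) : DecidablePred (GoodN A) := fun k => by unfold GoodN; infer_instance

def bestK (A : List Int) : Nat := max 1 (@Nat.findGreatest (GoodN A) (goodDec A) A.length)

lemma good_mono (A : List Int) {j k : Nat} (h : GoodN A k) (hjk : j ≤ k) : GoodN A j := by
  obtain ⟨s, hs, hsk, hw⟩ := h
  exact ⟨s, hs, by omega, fun t ht => le_trans (by exact_mod_cast hjk) (hw t (by omega))⟩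

lemma innerJ_spec (A : List Int) (K : Nat) (j : Nat) (hj : j ≤ A.length) :
    j ≤ innerJ A K j ∧ innerJ A K j ≤ A.length ∧
    (∀ t, j ≤ t → t < innerJ A K j → (K : Int) ≤ pvG A t) ∧
    (innerJ A K j = A.length ∨ pvG A (innerJ A K j) < (K : Int)) := by
  fun_induction innerJ A K j with
  | case1 j h ih =>
    obtain ⟨h1, h2, h3, h4⟩ := ih (by omega)
    refine ⟨by omega, h2, ?_, h4⟩
    intro t ht ht'
    rcases Nat.eq_or_lt_of_le ht with rfl | ht2
    · exact h.2
    · exact h3 t ht2 ht'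
  | case2 j h =>
    refine ⟨le_rfl, hj, by omega, ?_⟩
    rcases Nat.eq_or_lt_of_le hj with rfl | hlt
    · exact Or.inl rfl
    · push Not at h; exact Or.inr (h hlt)

lemma verifyFrom_iff (A : List Int) (K : Nat) (hK : 1 ≤ K) (i : Nat) (hi : i ≤ A.length) :
    verifyFrom A K i = true ↔
    ∃ s, i ≤ s ∧ s + K ≤ A.length ∧ ∀ t < K, (K : Int) ≤ pvG A (s + t) := by
  fun_induction verifyFrom A K i with
  | case1 i hilen hjK =>
    -- returned true: window [i, j) has length ≥ K
    simp only [true_iff]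
    obtain ⟨h1, h2, h3, h4⟩ := innerJ_spec A K i (by omega)
    exact ⟨i, le_rfl, by omega, fun t ht => h3 (i + t) (by omega) (by omega)⟩
  | case2 i hilen hjK ih =>
    obtain ⟨h1, h2, h3, h4⟩ := innerJ_spec A K i (by omega)
    rw [ih (by omega)]; clear ih
    constructor
    · rintro ⟨s, hs, hsl, hw⟩
      exact ⟨s, le_trans (le_trans (Nat.le_succ i) (Nat.le_max_right _ _)) hs, hsl, hw⟩
    · rintro ⟨s, hs, hsl, hw⟩
      refine ⟨s, ?_, hsl, hw⟩
      have hnotwin : ¬ s < innerJ A K i := by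
        intro hsj
        rcases Nat.lt_or_ge (s + K) (innerJ A K i + 1) with hsk | hsk
        · omega
        · have hjl : innerJ A K i < A.length := by omega
          have hwj := hw (innerJ A K i - s) (by omega)
          rw [Nat.add_sub_cancel' (by omega)] at hwj
          rcases h4 with h | h
          · omega
          · exact absurd hwj (not_le.mpr h)
      have hs1 : s ≠ i := by
        intro rfl_si
        have hw0 := hw 0 (by omega)
        rw [rfl_si, Nat.add_zero] at hw0
        have hji : innerJ A K i = i := by omega
        rcases h4 with h | h
        · omega
        · rw [hji] at h; exact absurd hw0 (not_le.mpr h)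
      exact Nat.max_le.mpr ⟨by omega, by omega⟩
  | case3 i hilen =>
    constructor
    · intro h; exact absurd h (by simp)
    · rintro ⟨s, hs, hsl, hw⟩; omega

lemma verify_good (A : List Int) (K : Nat) (hK : 1 ≤ K) :
    verifyFrom A K 0 = true ↔ GoodN A K := by
  rw [verifyFrom_iff A K hK 0 (Nat.zero_le _)]
  constructor
  · rintro ⟨s, _, hs, hw⟩; exact ⟨s, by omega, hs, hw⟩
  · rintro ⟨s, _, hs, hw⟩; exact ⟨s, by omega, hs, hw⟩

lemma bsLoop_eq (A : List Int) (l u : Nat) (h1 : 1 ≤ l) (hlM : l ≤ bestK A)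
    (hMu : bestK A ≤ u) (hun : u ≤ A.length) : bsLoop A l u = bestK A := by
  letI : DecidablePred (GoodN A) := goodDec A
  have H : ∀ d l u, u - l ≤ d → 1 ≤ l → l ≤ bestK A → bestK A ≤ u → u ≤ A.length →
      bsLoop A l u = bestK A := by
    intro d
    induction d with
    | zero =>
      intro l u hd h1 hlM hMu hun
      rw [bsLoop, dif_neg (by omega)]
      omega
    | succ d ihd =>
      intro l u hd h1 hlM hMu hun
      rw [bsLoop]
      by_cases hlu : l < u
      · rw [dif_pos hlu]
        have hm1 : l + 1 ≤ (l + u + 1) / 2 := by omega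
        have hm2 : (l + u + 1) / 2 ≤ u := by omega
        by_cases hv : verifyFrom A ((l + u + 1) / 2) 0 = true
        · rw [if_pos hv]
          have hgood : GoodN A ((l + u + 1) / 2) :=
            (verify_good A _ (by omega)).mp hv
          have := Nat.le_findGreatest (P := GoodN A) (n := A.length) (m := (l + u + 1) / 2)
            (by omega) hgood
          exact ihd _ _ (by omega) (by omega) (by unfold bestK; omega) hMu hun
        · rw [if_neg hv]
          have hF : Nat.findGreatest (GoodN A) A.length ≤ (l + u + 1) / 2 - 1 := by
            by_contra hcon
            have hFpos : 0 < Nat.findGreatest (GoodN A) A.length := by omega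
            have hgF : GoodN A (Nat.findGreatest (GoodN A) A.length) :=
              (Nat.findGreatest_eq_iff.1 rfl).2.1 (by omega)
            exact hv ((verify_good A _ (by omega)).mpr (good_mono A hgF (by omega)))
          exact ihd _ _ (by omega) h1 hlM (by unfold bestK; omega) (by omega)
      · rw [dif_neg hlu]; omega
  exact H (u - l) l u le_rfl h1 hlM hMu hun

lemma solution_eq_bestK (A : List Int) : solution A = (bestK A : Int) := by
  letI : DecidablePred (GoodN A) := goodDec A
  unfold solution
  rcases Nat.eq_zero_or_pos A.length with h0 | hpos
  · rw [h0]; unfold bsLoop; simp [bestK, h0]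
  · rw [bsLoop_eq A 1 A.length le_rfl (by unfold bestK; omega)
      (by unfold bestK
          have := Nat.findGreatest_le (P := GoodN A) (n := A.length); omega) le_rfl]

-- B-side: postconditions of the span computations
def LOK (A : List Int) (i p : Nat) : Prop :=
  p ≤ i ∧ (∀ t, p ≤ t → t ≤ i → pvG A i ≤ pvG A t) ∧ (p = 0 ∨ pvG A (p - 1) < pvG A i)

def ROK (A : List Int) (i q : Nat) : Prop :=
  i ≤ q ∧ q < A.length ∧ (∀ t, i ≤ t → t ≤ q → pvG A i ≤ pvG A t) ∧
  (q + 1 = A.length ∨ pvG A (q + 1) < pvG A i)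

lemma jumpL_spec (A : List Int) (acc : List Nat) (i : Nat)
    (hacc : ∀ j, j < acc.length → LOK A j (acc.getD j 0)) (hlen : acc.length = i) :
    ∀ fuel p, p ≤ fuel → p ≤ i → (∀ t, p ≤ t → t ≤ i → pvG A i ≤ pvG A t) →
    LOK A i (jumpL A acc (pvG A i) p fuel) := by
  intro fuel
  induction fuel with
  | zero =>
    intro p hpf hpi hw
    have : p = 0 := by omega
    subst this
    exact ⟨hpi, hw, Or.inl rfl⟩
  | succ fuel ih =>
    intro p hpf hpi hw
    rw [jumpL]
    by_cases hc : 0 < p ∧ pvG A i ≤ pvG A (p - 1)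
    · rw [if_pos hc]
      have hlok := hacc (p - 1) (by omega)
      obtain ⟨hp', hw', _⟩ := hlok
      apply ih
      · omega
      · omega
      · intro t ht ht'
        by_cases htp : t ≤ p - 1
        · exact le_trans hc.2 (hw' t ht htp)
        · exact hw t (by omega) ht'
    · rw [if_neg hc]
      refine ⟨hpi, hw, ?_⟩
      by_cases hp0 : p = 0
      · exact Or.inl hp0
      · right
        rcases not_and_or.mp hc with h | h
        · omega
        · exact lt_of_not_ge h

lemma leftLoop_spec (A : List Int) :
    ∀ i acc, acc.length = i → i ≤ A.length → (∀ j, j < i → LOK A j (acc.getD j 0)) →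
    (leftLoop A i acc).length = A.length ∧
    ∀ j, j < A.length → LOK A j ((leftLoop A i acc).getD j 0) := by
  have H : ∀ d i acc, A.length - i ≤ d → acc.length = i → i ≤ A.length →
      (∀ j, j < i → LOK A j (acc.getD j 0)) →
      (leftLoop A i acc).length = A.length ∧
      ∀ j, j < A.length → LOK A j ((leftLoop A i acc).getD j 0) := by
    intro d
    induction d with
    | zero =>
      intro i acc hd hlen hi hacc
      rw [leftLoop, dif_neg (by omega)]
      exact ⟨by omega, fun j hj => hacc j (by omega)⟩
    | succ d ihd =>
      intro i acc hd hlen hi hacc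
      rw [leftLoop]
      by_cases hil : i < A.length
      · rw [dif_pos hil]
        apply ihd
        · omega
        · simp [hlen]
        · omega
        · intro j hj
          rcases Nat.lt_or_ge j i with hji | hji
          · rw [List.getD_append _ _ _ _ (by omega)]
            exact hacc j hji
          · have hji' : j = i := by omega
            subst hji'
            rw [List.getD_append_right _ _ _ _ (by omega), hlen, Nat.sub_self]
            simp only [List.getD_cons_zero]
            exact jumpL_spec A acc j (fun m hm => hacc m (by omega)) hlen (j + 1) j
              (by omega) le_rfl
              (fun t ht ht' => le_of_eq (congrArg (pvG A) ((by omega : t = j).symm)))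
      · rw [dif_neg hil]
        exact ⟨by omega, fun j hj => hacc j (by omega)⟩
  intro i acc h1 h2 h3
  exact H (A.length - i) i acc le_rfl h1 h2 h3

lemma jumpR_spec (A : List Int) (racc : List Nat) (i : Nat)
    (hracc : ∀ j, i < j → j < A.length → ROK A j (racc.getD (j - (i + 1)) 0)) :
    ∀ fuel q, A.length ≤ q + fuel + 1 → i ≤ q → q < A.length →
    (∀ t, i ≤ t → t ≤ q → pvG A i ≤ pvG A t) →
    ROK A i (jumpR A racc i (pvG A i) q fuel) := by
  intro fuel
  induction fuel with
  | zero =>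
    intro q hf hiq hql hw
    have hr : jumpR A racc i (pvG A i) q 0 = q := rfl
    rw [hr]
    exact ⟨hiq, hql, hw, Or.inl (by omega)⟩
  | succ fuel ih =>
    intro q hf hiq hql hw
    rw [jumpR]
    by_cases hc : q + 1 < A.length ∧ pvG A i ≤ pvG A (q + 1)
    · rw [if_pos hc]
      have hrq := hracc (q + 1) (by omega) hc.1
      have heq : q + 1 - (i + 1) = q - i := by omega
      rw [heq] at hrq
      obtain ⟨h1', h2', h3', _⟩ := hrq
      apply ih
      · omega
      · omega
      · exact h2'
      · intro t ht ht'
        by_cases htq : t ≤ q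
        · exact hw t ht htq
        · exact le_trans hc.2 (h3' t (by omega) ht')
    · rw [if_neg hc]
      refine ⟨hiq, hql, hw, ?_⟩
      rcases not_and_or.mp hc with h | h
      · exact Or.inl (by omega)
      · exact Or.inr (lt_of_not_ge h)

lemma rightLoop_spec (A : List Int) :
    ∀ i racc, i ≤ A.length → racc.length = A.length - i →
    (∀ j, i ≤ j → j < A.length → ROK A j (racc.getD (j - i) 0)) →
    (rightLoop A i racc).length = A.length ∧
    ∀ j, j < A.length → ROK A j ((rightLoop A i racc).getD j 0) := by
  intro i
  induction i with
  | zero =>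
    intro racc hi hlen hracc
    rw [rightLoop]
    exact ⟨by omega, fun j hj => by simpa using hracc j (by omega) hj⟩
  | succ i ih =>
    intro racc hi hlen hracc
    rw [rightLoop]
    apply ih
    · omega
    · simp [hlen]; omega
    · intro j hj hj'
      rcases Nat.eq_or_lt_of_le hj with heq | hji
      · cases heq
        rw [Nat.sub_self]
        simp only [List.getD_cons_zero]
        exact jumpR_spec A racc i hracc (A.length - i) i (by omega) le_rfl (by omega)
          (fun t ht ht' => le_of_eq (congrArg (pvG A) ((by omega : t = i).symm)))
      · have heq : j - i = (j - (i + 1)) + 1 := by omega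
        rw [heq]
        simp only [List.getD_cons_succ]
        exact hracc j hji hj'

lemma bestLoop_ge_init (A : List Int) (L R : List Nat) :
    ∀ i best, best ≤ bestLoop A L R i best := by
  have H : ∀ d i best, A.length - i ≤ d → best ≤ bestLoop A L R i best := by
    intro d
    induction d with
    | zero =>
      intro i best hd
      rw [bestLoop]
      rw [dif_neg (by omega : ¬ i < A.length)]
    | succ d ihd =>
      intro i best hd
      rw [bestLoop]
      by_cases h : i < A.length
      · rw [dif_pos h]
        refine le_trans ?_ (ihd (i + 1) _ (by omega))
        split_ifs with hc
        · omega
        · exact le_rfl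
      · rw [dif_neg h]
  intro i best
  exact H (A.length - i) i best le_rfl

lemma bestLoop_ge_cand (A : List Int) (L R : List Nat) :
    ∀ i best j, i ≤ j → j < A.length → candV A L R j ≤ bestLoop A L R i best := by
  have H : ∀ d i best j, A.length - i ≤ d → i ≤ j → j < A.length →
      candV A L R j ≤ bestLoop A L R i best := by
    intro d
    induction d with
    | zero =>
      intro i best j hd hij hj
      exact absurd hj (by omega)
    | succ d ihd =>
      intro i best j hd hij hj
      rw [bestLoop, dif_pos (by omega)]
      rcases Nat.eq_or_lt_of_le hij with heq | hlt
      · cases heq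
        refine le_trans ?_ (bestLoop_ge_init A L R (i + 1) _)
        split_ifs with hc <;> omega
      · exact ihd (i + 1) _ j (by omega) hlt hj
  intro i best j h1 h2
  exact H (A.length - i) i best j le_rfl h1 h2

lemma bestLoop_le (A : List Int) (L R : List Nat) (B : Int) :
    ∀ i best, best ≤ B → (∀ j, i ≤ j → j < A.length → candV A L R j ≤ B) →
    bestLoop A L R i best ≤ B := by
  have H : ∀ d i best, A.length - i ≤ d → best ≤ B →
      (∀ j, i ≤ j → j < A.length → candV A L R j ≤ B) →
      bestLoop A L R i best ≤ B := by
    intro d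
    induction d with
    | zero =>
      intro i best hd hbB hcB
      rw [bestLoop, dif_neg (by omega)]
      exact hbB
    | succ d ihd =>
      intro i best hd hbB hcB
      rw [bestLoop]
      by_cases h : i < A.length
      · rw [dif_pos h]
        apply ihd _ _ (by omega)
        · split_ifs with hc
          · exact hcB i le_rfl h
          · exact hbB
        · exact fun j hj hj' => hcB j (by omega) hj'
      · rw [dif_neg h]
        exact hbB
  intro i best h1 h2
  exact H (A.length - i) i best le_rfl h1 h2

lemma cand_le_bestK (A : List Int) (L R : List Nat)
    (hL : ∀ j, j < A.length → LOK A j (L.getD j 0))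
    (hR : ∀ j, j < A.length → ROK A j (R.getD j 0)) :
    ∀ j, j < A.length → candV A L R j ≤ (bestK A : Int) := by
  letI : DecidablePred (GoodN A) := goodDec A
  intro j hj
  have hb1 : 1 ≤ bestK A := Nat.le_max_left 1 _
  by_cases hcpos : 1 ≤ candV A L R j
  · obtain ⟨hLp, hLw, _⟩ := hL j hj
    obtain ⟨hRp1, hRp2, hRw, _⟩ := hR j hj
    have hk : ((candV A L R j).toNat : Int) = candV A L R j := Int.toNat_of_nonneg (by omega)
    have hcle1 : candV A L R j ≤ pvG A j := by
      unfold candV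
      split_ifs with hc <;> omega
    have hcle2 : candV A L R j ≤ (R.getD j 0 : Int) - (L.getD j 0 : Int) + 1 := by
      unfold candV
      split_ifs with hc <;> omega
    have hgood : GoodN A (candV A L R j).toNat := by
      refine ⟨L.getD j 0, by omega, by omega, ?_⟩
      intro t ht
      rw [hk]
      by_cases hlt : L.getD j 0 + t ≤ j
      · exact le_trans hcle1 (hLw (L.getD j 0 + t) (by omega) hlt)
      · exact le_trans hcle1 (hRw (L.getD j 0 + t) (by omega) (by omega))
    have hfind := Nat.le_findGreatest (P := GoodN A) (n := A.length)
      (m := (candV A L R j).toNat) (by omega) hgood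
    unfold bestK
    omega
  · unfold bestK
    omega

lemma bestK_le_result (A : List Int) (L R : List Nat)
    (hL : ∀ j, j < A.length → LOK A j (L.getD j 0))
    (hR : ∀ j, j < A.length → ROK A j (R.getD j 0)) :
    (bestK A : Int) ≤ bestLoop A L R 0 1 := by
  letI : DecidablePred (GoodN A) := goodDec A
  rcases Nat.eq_zero_or_pos (Nat.findGreatest (GoodN A) A.length) with hF | hF
  · have := bestLoop_ge_init A L R 0 1
    unfold bestK
    omega
  · have hgF : GoodN A (Nat.findGreatest (GoodN A) A.length) :=
      (Nat.findGreatest_eq_iff.1 rfl).2.1 (by omega)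
    obtain ⟨s, hs, hsl, hw⟩ := hgF
    obtain ⟨i0, hi0mem, hi0min⟩ := Finset.exists_min_image
      (Finset.Ico s (s + Nat.findGreatest (GoodN A) A.length)) (pvG A)
      ⟨s, Finset.mem_Ico.mpr ⟨le_rfl, by omega⟩⟩
    rw [Finset.mem_Ico] at hi0mem
    have hi0len : i0 < A.length := by omega
    obtain ⟨hLp, hLw, hLb⟩ := hL i0 hi0len
    obtain ⟨hRp1, hRp2, hRw, hRb⟩ := hR i0 hi0len
    have hls : L.getD i0 0 ≤ s := by
      by_contra hcon
      rcases hLb with h0 | hb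
      · omega
      · have := hi0min (L.getD i0 0 - 1) (Finset.mem_Ico.mpr ⟨by omega, by omega⟩)
        omega
    have hrs : s + Nat.findGreatest (GoodN A) A.length - 1 ≤ R.getD i0 0 := by
      by_contra hcon
      rcases hRb with h0 | hb
      · omega
      · have := hi0min (R.getD i0 0 + 1) (Finset.mem_Ico.mpr ⟨by omega, by omega⟩)
        omega
    have hpv : (Nat.findGreatest (GoodN A) A.length : Int) ≤ pvG A i0 := by
      have := hw (i0 - s) (by omega)
      rwa [Nat.add_sub_cancel' (by omega)] at this
    have hcand : (Nat.findGreatest (GoodN A) A.length : Int) ≤ candV A L R i0 := by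
      unfold candV
      split_ifs with hc
      · exact hpv
      · omega
    have hres := bestLoop_ge_cand A L R 0 1 i0 (Nat.zero_le _) hi0len
    unfold bestK
    omega

lemma solution_alt_eq_bestK (A : List Int) : solution_alt A = (bestK A : Int) := by
  unfold solution_alt
  obtain ⟨hLlen, hL⟩ := leftLoop_spec A 0 [] rfl (Nat.zero_le _) (by intro j hj; omega)
  obtain ⟨hRlen, hR⟩ := rightLoop_spec A A.length [] le_rfl (by simp) (by intro j hj hj'; omega)
  apply le_antisymm
  · exact bestLoop_le A _ _ _ 0 1 (by unfold bestK; omega)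
      (fun j _ hj => cand_le_bestK A _ _ hL hR j hj)
  · exact bestK_le_result A _ _ hL hR

-- ===== VERDICT (by name: the statement is the Claim_ definition above) =====
theorem solution_spec : Claim_equal_solution := by
  intro A _
  unfold Spec_solution
  rw [solution_eq_bestK, solution_alt_eq_bestK]
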